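-- pv_equiv track=rewrite | github.com/jm24zm18/jarvis | src/jarvis/onboarding/service.py | _sanitize_assistant_text
-- ===== SOURCE A (Python) =====
-- def _sanitize_assistant_text(text: str) -> str:
--     cleaned = text.replace("<|end|>", "").strip()
--     control_markers = (
--         "<|start|>",
--         "<|channel|>",
--         "<|message|>",
--         "<|analysis|>",
--         "<|final|>",
--     )
--     first_marker: int | None = None
--     for marker in control_markers:
--         idx = cleaned.find(marker)
--         if idx == -1:
--             continue
--         first_marker = idx if first_marker is None else min(first_marker, idx)
--     if first_marker is not None:
--         cleaned = cleaned[:first_marker].strip()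
--     return cleaned
-- ===== SOURCE B (Python) =====
-- def _sanitize_assistant_text(text: str) -> str:
--     cleaned = text.replace("<|end|>", "").strip()
--     control_markers = (
--         "<|start|>",
--         "<|channel|>",
--         "<|message|>",
--         "<|analysis|>",
--         "<|final|>",
--     )
--     for i in range(len(cleaned)):
--         if any(cleaned.startswith(m, i) for m in control_markers):
--             return cleaned[:i].strip()
--     return cleaned
-- ===== Notes on version B (the rewrite author's own statement) =====
-- stated objective: alternative
-- what changed: Replaces the five separate str.find scans plus running-min bookkeeping with a single left-to-right scan that returns at the first position where any control marker starts.
import Mathlib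
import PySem

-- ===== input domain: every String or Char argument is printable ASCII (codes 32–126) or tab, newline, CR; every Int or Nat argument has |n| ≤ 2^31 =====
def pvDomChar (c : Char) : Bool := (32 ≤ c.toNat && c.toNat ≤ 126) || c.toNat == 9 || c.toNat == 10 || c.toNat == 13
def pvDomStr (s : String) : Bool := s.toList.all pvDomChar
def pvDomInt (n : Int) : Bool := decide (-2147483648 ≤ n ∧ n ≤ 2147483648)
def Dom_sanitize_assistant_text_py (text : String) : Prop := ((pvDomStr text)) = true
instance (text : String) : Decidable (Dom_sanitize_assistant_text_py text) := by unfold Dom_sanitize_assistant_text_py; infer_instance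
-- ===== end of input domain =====

-- B replaces A's five separate find scans plus running-min bookkeeping by one left-to-right scan
-- that stops at the first position where any control marker starts (objective: alternative).

-- ===== PORT A =====
def sanitize_assistant_text_py (text : String) : String :=
  let cleaned := PySem.Str.strip (PySem.Str.replace text "<|end|>" "")
  let control_markers : List String :=
    ["<|start|>", "<|channel|>", "<|message|>", "<|analysis|>", "<|final|>"]
  let first_marker : Option Int := control_markers.foldl
    (fun fm marker =>
      let idx := PySem.Str.find cleaned marker
      if idx = -1 then fm
      else some (match fm with | none => idx | some f => min f idx)) none
  match first_marker with
  | none => cleaned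
  | some f => PySem.Str.strip (PySem.Str.slice cleaned none (some f))

-- ===== PORT B =====
-- helper: the 'for i in range(len(cleaned)): if any(cleaned.startswith(m, i) …)' loop,
-- as structural recursion on the remaining suffix (i is the current index)
def pvFindCut (markers : List String) (i : Nat) : List Char → Option Nat
  | [] => none
  | c :: rest =>
    if markers.any (fun m => PySem.Chars.startswith (c :: rest) m.toList) then some i
    else pvFindCut markers (i + 1) rest

def sanitize_assistant_text_py_alt (text : String) : String :=
  let cleaned := PySem.Str.strip (PySem.Str.replace text "<|end|>" "")
  let control_markers : List String :=
    ["<|start|>", "<|channel|>", "<|message|>", "<|analysis|>", "<|final|>"]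
  match pvFindCut control_markers 0 cleaned.toList with
  | none => cleaned
  | some i => PySem.Str.strip (PySem.Str.slice cleaned none (some (i : Int)))

-- ===== PRECONDITION & SPEC =====
def Spec_sanitize_assistant_text_py (text : String) (out : String) : Prop := out = sanitize_assistant_text_py_alt text
instance (text : String) (out : String) : Decidable (Spec_sanitize_assistant_text_py text out) := by unfold Spec_sanitize_assistant_text_py; infer_instance

-- ===== CLAIM (what is proved, stated in full; the proofs are below) =====
def Claim_equal_sanitize_assistant_text_py : Prop := ∀ (text : String), Dom_sanitize_assistant_text_py text → Spec_sanitize_assistant_text_py text (sanitize_assistant_text_py text)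

-- ===== LEMMAS AND PROOFS =====

-- A's running-min fold returns none iff no marker is found
lemma pvFoldA_none_iff (cleaned : String) :
    ∀ (Ms : List String) (acc : Option Int),
      Ms.foldl (fun fm marker =>
        let idx := PySem.Str.find cleaned marker
        if idx = -1 then fm
        else some (match fm with | none => idx | some f => min f idx)) acc = none ↔
      acc = none ∧ ∀ m ∈ Ms, PySem.Str.find cleaned m = -1 := by
  intro Ms
  induction Ms with
  | nil => intro acc; simp
  | cons m Ms ih =>
    intro acc
    simp only [List.foldl_cons]
    by_cases hidx : PySem.Str.find cleaned m = -1
    · simp only [hidx, if_true, ih]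
      constructor
      · rintro ⟨h1, h2⟩
        refine ⟨h1, ?_⟩
        intro x hx
        rcases List.mem_cons.mp hx with h | h
        · rw [h]; exact hidx
        · exact h2 x h
      · rintro ⟨h1, h2⟩
        exact ⟨h1, fun x hx => h2 x (List.mem_cons_of_mem _ hx)⟩
    · simp only [if_neg hidx, ih]
      constructor
      · rintro ⟨h1, -⟩; cases acc <;> simp at h1
      · rintro ⟨-, h2⟩; exact absurd (h2 m (List.mem_cons_self)) hidx

-- A's running-min fold result: an element (or the accumulator) achieving it, and a lower bound
lemma pvFoldA_some (cleaned : String) :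
    ∀ (Ms : List String) (acc : Option Int) (v : Int),
      Ms.foldl (fun fm marker =>
        let idx := PySem.Str.find cleaned marker
        if idx = -1 then fm
        else some (match fm with | none => idx | some f => min f idx)) acc = some v →
      (acc = some v ∨ ∃ m ∈ Ms, PySem.Str.find cleaned m = v ∧ PySem.Str.find cleaned m ≠ -1) ∧
      (∀ w, acc = some w → v ≤ w) ∧
      (∀ m ∈ Ms, PySem.Str.find cleaned m = -1 ∨ v ≤ PySem.Str.find cleaned m) := by
  intro Ms
  induction Ms with
  | nil =>
    intro acc v h
    simp only [List.foldl_nil] at h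
    exact ⟨Or.inl h, fun w hw => by rw [h] at hw; exact le_of_eq (Option.some.inj hw), by simp⟩
  | cons m Ms ih =>
    intro acc v h
    simp only [List.foldl_cons] at h
    by_cases hidx : PySem.Str.find cleaned m = -1
    · simp only [hidx, if_true] at h
      obtain ⟨h1, h2, h3⟩ := ih acc v h
      refine ⟨?_, h2, ?_⟩
      · rcases h1 with h1 | ⟨x, hx, hfx, hfn⟩
        · exact Or.inl h1
        · exact Or.inr ⟨x, List.mem_cons_of_mem _ hx, hfx, hfn⟩
      · intro x hx
        rcases List.mem_cons.mp hx with hx | hx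
        · exact Or.inl (hx ▸ hidx)
        · exact h3 x hx
    · simp only [if_neg hidx] at h
      cases acc with
      | none =>
        obtain ⟨h1, h2, h3⟩ := ih _ v h
        have hv : v ≤ PySem.Str.find cleaned m := h2 _ rfl
        refine ⟨?_, by simp, ?_⟩
        · rcases h1 with h1 | ⟨x, hx, hfx, hfn⟩
          · exact Or.inr ⟨m, List.mem_cons_self, (Option.some.inj h1), hidx⟩
          · exact Or.inr ⟨x, List.mem_cons_of_mem _ hx, hfx, hfn⟩
        · intro x hx
          rcases List.mem_cons.mp hx with hx | hx
          · exact Or.inr (hx ▸ hv)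
          · exact h3 x hx
      | some f =>
        obtain ⟨h1, h2, h3⟩ := ih _ v h
        have hv : v ≤ min f (PySem.Str.find cleaned m) := h2 _ rfl
        refine ⟨?_, ?_, ?_⟩
        · rcases h1 with h1 | ⟨x, hx, hfx, hfn⟩
          · have hmv : min f (PySem.Str.find cleaned m) = v := Option.some.inj h1
            rcases min_cases f (PySem.Str.find cleaned m) with ⟨hmin, hle⟩ | ⟨hmin, hle⟩
            · exact Or.inl (by rw [hmin] at hmv; rw [hmv])
            · exact Or.inr ⟨m, List.mem_cons_self, (by rw [hmin] at hmv; exact hmv), hidx⟩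
          · exact Or.inr ⟨x, List.mem_cons_of_mem _ hx, hfx, hfn⟩
        · intro w hw
          have hfw : f = w := Option.some.inj hw
          exact hfw ▸ le_trans hv (min_le_left _ _)
        · intro x hx
          rcases List.mem_cons.mp hx with hx | hx
          · right; rw [hx]; exact le_trans hv (min_le_right _ _)
          · exact h3 x hx

-- B's scan returns none → no marker starts at any in-range position
lemma pvFindCut_none (M : List String) :
    ∀ (l : List Char) (i : Nat), pvFindCut M i l = none →
      ∀ j, j < l.length → (M.any fun m => PySem.Chars.startswith (l.drop j) m.toList) = false := by
  intro l
  induction l with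
  | nil => intro i _ j hj; simp at hj
  | cons c rest ih =>
    intro i h j hj
    rw [pvFindCut] at h
    by_cases hq : (M.any fun m => PySem.Chars.startswith (c :: rest) m.toList) = true
    · simp [hq] at h
    · rw [if_neg hq] at h
      cases j with
      | zero => simpa using (Bool.not_eq_true _).mp hq
      | succ j => exact ih (i + 1) h j (by simpa using hj)

-- B's scan returns some k → a marker starts at k - i, and none earlier
lemma pvFindCut_some (M : List String) :
    ∀ (l : List Char) (i k : Nat), pvFindCut M i l = some k →
      i ≤ k ∧ k - i < l.length ∧
      (M.any fun m => PySem.Chars.startswith (l.drop (k - i)) m.toList) = true ∧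
      ∀ j, j < k - i → (M.any fun m => PySem.Chars.startswith (l.drop j) m.toList) = false := by
  intro l
  induction l with
  | nil => intro i k h; simp [pvFindCut] at h
  | cons c rest ih =>
    intro i k h
    rw [pvFindCut] at h
    by_cases hq : (M.any fun m => PySem.Chars.startswith (c :: rest) m.toList) = true
    · rw [if_pos hq] at h
      have hk : i = k := Option.some.inj h
      subst hk
      exact ⟨le_refl _, by simp, by simpa using hq, by intro j hj; omega⟩
    · rw [if_neg hq] at h
      obtain ⟨h1, h2, h3, h4⟩ := ih (i + 1) k h
      refine ⟨by omega, by simp; omega, ?_, ?_⟩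
      · have : k - i = (k - (i + 1)) + 1 := by omega
        rw [this]; simpa using h3
      · intro j hj
        cases j with
        | zero => simpa using (Bool.not_eq_true _).mp hq
        | succ j =>
          have : j < k - (i + 1) := by omega
          simpa using h4 j this

-- a marker is an infix of cs iff it is a prefix of some in-range suffix (markers are nonempty)
lemma pvMarker_nonempty :
    ∀ m ∈ (["<|start|>", "<|channel|>", "<|message|>", "<|analysis|>", "<|final|>"] : List String),
      m.toList ≠ [] := by decide

theorem sanitize_assistant_text_py_spec : Claim_equal_sanitize_assistant_text_py := by
  intro text _
  simp only [Spec_sanitize_assistant_text_py, sanitize_assistant_text_py, sanitize_assistant_text_py_alt]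
  set cleaned := PySem.Str.strip (PySem.Str.replace text "<|end|>" "") with hcl
  set Ms : List String := ["<|start|>", "<|channel|>", "<|message|>", "<|analysis|>", "<|final|>"] with hMs
  set cs : List Char := cleaned.toList with hcs
  cases hB : pvFindCut Ms 0 cs with
  | none =>
    -- no marker occurs anywhere: every find is -1, so A's fold is none
    have hall : ∀ m ∈ Ms, PySem.Str.find cleaned m = -1 := by
      intro m hm
      rw [PySem.Str.find_eq_neg_one_iff]
      intro hinf
      have : ∃ j, m.toList <+: cs.drop j :=
        (PySem.Chars.exists_prefix_drop_iff_isIn m.toList cs).mpr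
          ((PySem.Chars.isIn_iff_infix m.toList cs).mpr hinf)
      obtain ⟨j, hj⟩ := this
      by_cases hlen : j < cs.length
      · have := pvFindCut_none Ms cs 0 hB j hlen
        have hsw : PySem.Chars.startswith (cs.drop j) m.toList = true :=
          (PySem.Chars.startswith_iff _ _).mpr hj
        have : (Ms.any fun m => PySem.Chars.startswith (cs.drop j) m.toList) = true :=
          List.any_eq_true.mpr ⟨m, hm, hsw⟩
        simp_all
      · have hd : cs.drop j = [] := List.drop_eq_nil_of_le (by omega)
        rw [hd] at hj
        exact pvMarker_nonempty m hm (List.prefix_nil.mp hj)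
    have hfold : Ms.foldl (fun fm marker =>
        if PySem.Str.find cleaned marker = -1 then fm
        else some (match fm with | none => PySem.Str.find cleaned marker | some f => min f (PySem.Str.find cleaned marker))) none = none :=
      (pvFoldA_none_iff cleaned Ms none).mpr ⟨rfl, hall⟩
    rw [hfold]
  | some k =>
    obtain ⟨-, hklen, hQ, hmin⟩ := pvFindCut_some Ms cs 0 k hB
    simp only [Nat.sub_zero] at hklen hQ hmin
    -- the witness marker starting at k
    obtain ⟨m0, hm0, hsw0⟩ := List.any_eq_true.mp hQ
    have hpre0 : m0.toList <+: cs.drop k := (PySem.Chars.startswith_iff _ _).mp hsw0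
    -- every found marker is found at a position ≥ k
    have hge : ∀ m ∈ Ms, PySem.Str.find cleaned m = -1 ∨ (k : Int) ≤ PySem.Str.find cleaned m := by
      intro m hm
      by_cases hne : PySem.Str.find cleaned m = -1
      · exact Or.inl hne
      · right
        have hinf : m.toList <:+: cs := (PySem.Str.find_ne_neg_one_iff cleaned m).mp hne
        have h0 : 0 ≤ PySem.Chars.find cs m.toList :=
          (PySem.Chars.find_nonneg_iff cs m.toList).mpr hinf
        obtain ⟨hp, -⟩ := PySem.Chars.find_spec h0
        by_contra hlt
        push Not at hlt
        have hfe : PySem.Str.find cleaned m = PySem.Chars.find cs m.toList := by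
          simp [hcs]
        rw [hfe] at hlt
        have hjk : (PySem.Chars.find cs m.toList).toNat < k := by omega
        have hfalse := hmin _ hjk
        have hsw : PySem.Chars.startswith (cs.drop (PySem.Chars.find cs m.toList).toNat) m.toList = true :=
          (PySem.Chars.startswith_iff _ _).mpr hp
        have htrue : (Ms.any fun m' => PySem.Chars.startswith (cs.drop (PySem.Chars.find cs m.toList).toNat) m'.toList) = true :=
          List.any_eq_true.mpr ⟨m, hm, hsw⟩
        rw [htrue] at hfalse
        exact absurd hfalse (by decide)
    -- the witness marker is found exactly at k
    have hfind0 : PySem.Str.find cleaned m0 = (k : Int) := by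
      have hinf : m0.toList <:+: cs :=
        (PySem.Chars.isIn_iff_infix m0.toList cs).mp
          ((PySem.Chars.exists_prefix_drop_iff_isIn m0.toList cs).mp ⟨k, hpre0⟩)
      have h0 : 0 ≤ PySem.Chars.find cs m0.toList :=
        (PySem.Chars.find_nonneg_iff cs m0.toList).mpr hinf
      obtain ⟨-, hminfind⟩ := PySem.Chars.find_spec h0
      have hfe : PySem.Str.find cleaned m0 = PySem.Chars.find cs m0.toList := by simp [hcs]
      have hle : (PySem.Chars.find cs m0.toList).toNat ≤ k := by
        by_contra hgt
        push Not at hgt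
        exact hminfind k hgt hpre0
      rcases hge m0 hm0 with hne | hgek
      · have := (PySem.Chars.find_nonneg_iff cs m0.toList).mpr hinf
        rw [hfe] at hne; omega
      · rw [hfe] at hgek ⊢; omega
    -- A's fold returns exactly some k
    cases hA : Ms.foldl (fun fm marker =>
        if PySem.Str.find cleaned marker = -1 then fm
        else some (match fm with | none => PySem.Str.find cleaned marker | some f => min f (PySem.Str.find cleaned marker))) none with
    | none =>
      obtain ⟨-, hall⟩ := (pvFoldA_none_iff cleaned Ms none).mp hA
      have := hall m0 hm0
      rw [hfind0] at this; omega
    | some v =>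
      obtain ⟨h1, -, h3⟩ := pvFoldA_some cleaned Ms none v hA
      have hvk : v = (k : Int) := by
        rcases h1 with h1 | ⟨x, hx, hfx, hfn⟩
        · simp at h1
        · have hkv : (k : Int) ≤ v := by
            rcases hge x hx with h | h
            · exact absurd h hfn
            · rw [hfx] at h; exact h
          have hvk' : v ≤ (k : Int) := by
            rcases h3 m0 hm0 with h | h
            · rw [hfind0] at h; omega
            · rw [hfind0] at h; exact h
          omega
      rw [hvk]
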